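-- pv_equiv track=rewrite | github.com/ChunhuaLab/PMSPcnn | code/features/PSSM/pssmviewer.py | help_Pro
-- ===== SOURCE A (Python) =====
-- def help_Pro(d):
--     teq = ['1', ]
--     for i in range(len(d)):
--         if 'seq-data' in d[i]:
--             teq.clear()
--         if len(teq) == 0:
--             if '}' in d[i]:
--                 d[i] = '}12345'
--                 return d
--             else:
--                 continue
--     return d
-- ===== SOURCE B (Python) =====
-- def help_Pro(d):
--     for j in range(len(d)):
--         if '}' in d[j] and any('seq-data' in s for s in d[:j + 1]):
--             d[j] = '}12345'
--             return d
--     return d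
-- ===== Notes on version B (the rewrite author's own statement) =====
-- stated objective: alternative
-- what changed: Replaces A's stateful single pass (a sentinel list cleared on 'seq-data', then armed) with a stateless brute-force scan: for each line, independently test whether it contains '}' and some line of its own prefix contains 'seq-data', marking the first such line.
import Mathlib
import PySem

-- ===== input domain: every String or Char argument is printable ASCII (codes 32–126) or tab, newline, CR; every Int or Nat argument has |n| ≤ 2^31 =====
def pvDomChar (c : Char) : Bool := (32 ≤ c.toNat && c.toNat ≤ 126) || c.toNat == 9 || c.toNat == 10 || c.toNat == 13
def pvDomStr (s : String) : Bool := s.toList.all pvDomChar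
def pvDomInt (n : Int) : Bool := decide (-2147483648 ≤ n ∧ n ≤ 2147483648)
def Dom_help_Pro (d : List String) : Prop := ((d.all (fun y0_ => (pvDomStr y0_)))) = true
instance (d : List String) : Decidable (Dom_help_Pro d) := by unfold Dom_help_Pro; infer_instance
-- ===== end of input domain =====

-- B replaces A's stateful flag-driven pass by a stateless brute-force scan (each line re-tests
-- its whole prefix for 'seq-data'); equivalence is about the returned list (both Pythons also
-- mutate d in place identically).

-- ===== PORT A =====
-- A's loop: state is the sentinel list teq; the processed prefix is accumulated (reversed).
def helpProGoA (teq : List String) (acc : List String) (rest : List String) : List String :=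
  match rest with
  | [] => acc.reverse
  | x :: xs =>
      let teq' := if PySem.Str.isIn "seq-data" x then [] else teq
      if teq'.length = 0 then
        if PySem.Str.isIn "}" x then acc.reverse ++ ("}12345" :: xs)
        else helpProGoA teq' (x :: acc) xs
      else helpProGoA teq' (x :: acc) xs

def help_Pro (d : List String) : List String := helpProGoA ["1"] [] d

-- ===== PORT B =====
-- Source B's `for j in range(len(d))` loop; `d[:j+1]` is d.take (j+1); the return after the
-- in-place write `d[j] = '}12345'` is take j ++ new ++ drop (j+1).
def helpProLoopB (d : List String) (j : Nat) : List String :=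
  if _h : j < d.length then
    if PySem.Str.isIn "}" (d.getD j "") &&
       ((d.take (j + 1)).any fun s => PySem.Str.isIn "seq-data" s) then
      d.take j ++ "}12345" :: d.drop (j + 1)
    else helpProLoopB d (j + 1)
  else d
termination_by d.length - j

def help_Pro_alt (d : List String) : List String := helpProLoopB d 0

-- ===== PRECONDITION & SPEC =====
def Spec_help_Pro (d : List String) (out : List String) : Prop := out = help_Pro_alt d
instance (d : List String) (out : List String) : Decidable (Spec_help_Pro d out) := by unfold Spec_help_Pro; infer_instance

-- ===== CLAIM (what is proved, stated in full; the proofs are below) =====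
def Claim_equal_help_Pro : Prop := ∀ (d : List String), Dom_help_Pro d → Spec_help_Pro d (help_Pro d)

-- ===== LEMMAS AND PROOFS =====
-- Common intermediate characterisation: locate the first 'seq-data' line, then mark the
-- first '}' line from there.  Both ports are proved equal to it.
def markClose (rest : List String) : List String :=
  match rest with
  | [] => []
  | x :: xs => if PySem.Str.isIn "}" x then "}12345" :: xs else x :: markClose xs

def twoPhase (d : List String) : List String :=
  match d.findIdx? (fun s => PySem.Str.isIn "seq-data" s) with
  | none => d
  | some start => d.take start ++ markClose (d.drop start)

-- once the sentinel is cleared, A's loop is exactly markClose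
theorem goA_cleared (acc rest : List String) :
    helpProGoA [] acc rest = acc.reverse ++ markClose rest := by
  induction rest generalizing acc with
  | nil => simp [helpProGoA, markClose]
  | cons x xs ih =>
      simp [helpProGoA, markClose, ih]
      split <;> simp

-- before the sentinel is cleared, A's loop computes twoPhase of the remaining suffix
theorem goA_armed (acc rest : List String) :
    helpProGoA ["1"] acc rest = acc.reverse ++ twoPhase rest := by
  induction rest generalizing acc with
  | nil => simp [helpProGoA, twoPhase]
  | cons x xs ih =>
      by_cases hs : PySem.Chars.isIn ['s','e','q','-','d','a','t','a'] x.toList = true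
      · simp [helpProGoA, hs, twoPhase, List.findIdx?_cons, markClose]
        split <;> simp [goA_cleared]
      · have hstep : helpProGoA ["1"] acc (x :: xs) = helpProGoA ["1"] (x :: acc) xs := by
          simp [helpProGoA, hs]
        rw [hstep, ih]
        simp only [twoPhase, List.findIdx?_cons]
        cases h : xs.findIdx? (fun s => PySem.Str.isIn "seq-data" s) with
        | none => simp [hs]
        | some k => simp [hs, List.take_succ_cons, List.drop_succ_cons]

theorem any_take_succ_mono (d : List String) (p : String → Bool) (j : Nat)
    (h : (d.take (j + 1)).any p = true) : (d.take (j + 2)).any p = true := by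
  rcases List.any_eq_true.mp h with ⟨x, hx, hp⟩
  refine List.any_eq_true.mpr ⟨x, ?_, hp⟩
  have hmem : x ∈ (d.take (j + 2)).take (j + 1) := by
    rw [List.take_take, Nat.min_eq_left (by omega)]; exact hx
  exact List.take_subset _ _ hmem

theorem twoPhase_cons_neg (x : String) (xs : List String)
    (hs : PySem.Str.isIn "seq-data" x = false) : twoPhase (x :: xs) = x :: twoPhase xs := by
  simp only [twoPhase, List.findIdx?_cons, hs]
  cases h : xs.findIdx? (fun s => PySem.Str.isIn "seq-data" s) with
  | none => simp
  | some k => simp [List.take_succ_cons, List.drop_succ_cons]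

theorem take_succ_append (d : List String) (j : Nat) (hj : j < d.length) (X : List String) :
    d.take (j + 1) ++ X = d.take j ++ d[j] :: X := by
  rw [List.take_add_one, List.getElem?_eq_getElem hj, Option.toList_some, List.append_assoc,
    List.singleton_append]

-- B's loop once some prefix line contains 'seq-data': it is markClose from j on
theorem bLoop_cleared (d : List String) (j : Nat)
    (h : ((d.take (j + 1)).any fun s => PySem.Str.isIn "seq-data" s) = true) :
    helpProLoopB d j = d.take j ++ markClose (d.drop j) := by
  by_cases hj : j < d.length
  · have hget : d.getD j "" = d[j] := by
      simp [List.getD, List.getElem?_eq_getElem hj]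
    have hdrop : d.drop j = d[j] :: d.drop (j + 1) := (List.getElem_cons_drop hj).symm
    have htake : d.take (j + 1) = d.take j ++ [d[j]] := by
      rw [List.take_add_one, List.getElem?_eq_getElem hj, Option.toList_some]
    by_cases hbr : PySem.Str.isIn "}" d[j] = true
    · have hbrC : PySem.Chars.isIn ['}'] d[j].toList = true := by simpa using hbr
      rw [helpProLoopB, dif_pos hj, hget, hbr, Bool.true_and, if_pos h, hdrop]
      simp [markClose, hbrC]
    · have hbrf : PySem.Str.isIn "}" d[j] = false := by simpa using hbr
      have hbrC : PySem.Chars.isIn ['}'] d[j].toList = false := by simpa using hbrf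
      rw [helpProLoopB, dif_pos hj, hget, hbrf, Bool.false_and, if_neg (by simp)]
      rw [bLoop_cleared d (j + 1) (any_take_succ_mono d _ j h), hdrop,
        take_succ_append d j hj]
      simp [markClose, hbrC]
  · have hle : d.length ≤ j := by omega
    rw [helpProLoopB, dif_neg hj, List.take_of_length_le hle, List.drop_of_length_le hle]
    simp [markClose]
termination_by d.length - j
decreasing_by omega

-- B's loop while no prefix line contains 'seq-data'
theorem bLoop_armed (d : List String) (j : Nat)
    (h : ((d.take j).all fun s => !PySem.Str.isIn "seq-data" s) = true) :
    helpProLoopB d j = d.take j ++ twoPhase (d.drop j) := by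
  by_cases hj : j < d.length
  · have hget : d.getD j "" = d[j] := by
      simp [List.getD, List.getElem?_eq_getElem hj]
    have hdrop : d.drop j = d[j] :: d.drop (j + 1) := (List.getElem_cons_drop hj).symm
    have htake : d.take (j + 1) = d.take j ++ [d[j]] := by
      rw [List.take_add_one, List.getElem?_eq_getElem hj, Option.toList_some]
    have hanyeq : ((d.take (j + 1)).any fun s => PySem.Str.isIn "seq-data" s)
        = PySem.Str.isIn "seq-data" d[j] := by
      have hanyf : ((d.take j).any fun s => PySem.Str.isIn "seq-data" s) = false := by
        refine List.any_eq_false.mpr fun x hx => ?_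
        have := List.all_eq_true.mp h x hx
        simpa using this
      rw [htake, List.any_append, hanyf, List.any_cons, List.any_nil]
      simp
    by_cases hseq : PySem.Str.isIn "seq-data" d[j] = true
    · have hseqC : PySem.Chars.isIn ['s','e','q','-','d','a','t','a'] d[j].toList = true := by
        simpa using hseq
      have hany : ((d.take (j + 1)).any fun s => PySem.Str.isIn "seq-data" s) = true := by
        rw [hanyeq]; exact hseq
      have hseqS : PySem.Chars.isIn "seq-data".toList d[j].toList = true := by
        rw [← PySem.Str.isIn_eq]; exact hseq
      have htwo : twoPhase (d.drop j) = markClose (d.drop j) := by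
        rw [hdrop]
        simp only [twoPhase, List.findIdx?_cons, PySem.Str.isIn_eq, hseqS, if_true,
          List.take_zero, List.drop_zero, List.nil_append]
      by_cases hbr : PySem.Str.isIn "}" d[j] = true
      · have hbrC : PySem.Chars.isIn ['}'] d[j].toList = true := by simpa using hbr
        rw [helpProLoopB, dif_pos hj, hget, hbr, Bool.true_and, if_pos hany, htwo, hdrop]
        simp [markClose, hbrC]
      · have hbrf : PySem.Str.isIn "}" d[j] = false := by simpa using hbr
        have hbrC : PySem.Chars.isIn ['}'] d[j].toList = false := by simpa using hbrf
        rw [helpProLoopB, dif_pos hj, hget, hbrf, Bool.false_and, if_neg (by simp)]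
        rw [bLoop_cleared d (j + 1) (any_take_succ_mono d _ j hany), htwo, hdrop,
          take_succ_append d j hj]
        simp [markClose, hbrC]
    · have hseqf : PySem.Str.isIn "seq-data" d[j] = false := by simpa using hseq
      have hall : ((d.take (j + 1)).all fun s => !PySem.Str.isIn "seq-data" s) = true := by
        rw [htake, List.all_append, h, Bool.true_and, List.all_cons, List.all_nil, Bool.and_true,
          hseqf]
        rfl
      rw [helpProLoopB, dif_pos hj, hget, hanyeq, hseqf, Bool.and_false, if_neg (by simp)]
      rw [bLoop_armed d (j + 1) hall, hdrop, twoPhase_cons_neg _ _ hseqf,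
        take_succ_append d j hj]
  · have hle : d.length ≤ j := by omega
    rw [helpProLoopB, dif_neg hj, List.take_of_length_le hle, List.drop_of_length_le hle]
    simp [twoPhase]
termination_by d.length - j
decreasing_by omega

-- ===== VERDICT (by name: the statement is the Claim_ definition above) =====
theorem help_Pro_spec : Claim_equal_help_Pro := by
  intro d _
  unfold Spec_help_Pro help_Pro help_Pro_alt
  rw [bLoop_armed d 0 (by simp)]
  simpa using goA_armed [] d
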